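-- pv_equiv track=rewrite | github.com/ericcheng09/LeetCodeSol_Python | Scripts/1170.py | numSmallerByFrequency
-- ===== SOURCE A (Python) =====
-- def numSmallerByFrequency(queries, words):
--     """
--     :type queries: List[str]
--     :type words: List[str]
--     :rtype: List[int]
--     """
--     ans = []
--     wordF = []
--
--     def f(word):
--         word = sorted(list(word))
--         return word.count(word[0])
--
--     for word in words:
--         wordF.append(f(word))
--     wordF.sort()
--
--     for query in queries:
--         F = f(query)
--         count = 0
--         for n in wordF:
--             if n > F:
--                 count += 1
--         ans.append(count)
--     return ans
-- ===== SOURCE B (Python) =====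
-- def numSmallerByFrequency(queries, words):
--     # f(w): frequency of the lexicographically smallest character, via min + scan
--     def f(w):
--         m = min(w)
--         return sum(1 for c in w if c == m)
--
--     wf = sorted(f(w) for w in words)
--     n = len(wf)
--
--     # rightmost insertion point in the sorted list wf (hand-written bisect_right)
--     def bisect_right(a, x):
--         lo, hi = 0, len(a)
--         while lo < hi:
--             mid = (lo + hi) // 2
--             if x < a[mid]:
--                 hi = mid
--             else:
--                 lo = mid + 1
--         return lo
--
--     return [n - bisect_right(wf, f(q)) for q in queries]
-- ===== Notes on version B (the rewrite author's own statement) =====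
-- stated objective: faster
-- what changed: B computes each word's min-char frequency by a direct min + counting scan instead of sorting the characters, sorts the frequency list once, and answers each query with a hand-written binary search (bisect_right) instead of A's linear scan over all word frequencies.
-- outside the precondition, e.g. on numSmallerByFrequency(['a'], ['']): A raises IndexError, B raises ValueError
import Mathlib
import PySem

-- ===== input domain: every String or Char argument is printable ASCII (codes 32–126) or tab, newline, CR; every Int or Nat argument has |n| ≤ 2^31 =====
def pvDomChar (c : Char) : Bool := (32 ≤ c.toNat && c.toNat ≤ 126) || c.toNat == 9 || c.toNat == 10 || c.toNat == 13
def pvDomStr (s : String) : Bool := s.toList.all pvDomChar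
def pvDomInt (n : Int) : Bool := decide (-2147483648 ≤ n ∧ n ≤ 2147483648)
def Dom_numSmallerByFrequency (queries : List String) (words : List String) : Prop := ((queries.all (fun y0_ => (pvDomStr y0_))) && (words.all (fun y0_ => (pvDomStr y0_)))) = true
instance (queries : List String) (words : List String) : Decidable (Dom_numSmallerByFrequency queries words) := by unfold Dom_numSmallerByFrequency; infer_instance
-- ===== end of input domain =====

-- B replaces A's per-query linear scan over the sorted frequency list by a hand-written
-- binary search (and computes each min-char frequency by a direct min + scan instead of
-- sorting the characters): asymptotically faster, O((Q+W)(L + log W)) vs O(Q·W + (Q+W)·L log L).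

-- ===== PORT A =====
-- f(word): sort the characters, count occurrences of the first (= smallest) one.
-- word[0] on an empty string raises IndexError in Python: pyGet? returns none there,
-- those inputs are excluded by Pre_; the 0 branch is never reached inside Pre_.
def pvA_f (word : String) : Int :=
  let w := PySem.List.sorted word.toList (fun c => c) false
  match PySem.List.pyGet? w 0 with
  | some c => (w.count c : Int)
  | none => 0

def numSmallerByFrequency (queries : List String) (words : List String) : List Int :=
  let wordF := words.foldl (fun acc word => acc ++ [pvA_f word]) []
  let wordF := PySem.List.sorted wordF (fun x => x) false
  queries.foldl (fun ans query =>
    let F := pvA_f query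
    let count := wordF.foldl (fun count n => if n > F then count + 1 else count) (0 : Int)
    ans ++ [count]) []

-- ===== PORT B =====
-- f(w): m = min(w) (raises ValueError on empty w: min? = none, excluded by Pre_);
-- then a single counting scan sum(1 for c in w if c == m).
def pvB_f (w : String) : Int :=
  match PySem.List.min? w.toList (fun c => c) with
  | some m => (w.toList.countP (fun c => c == m) : Int)
  | none => 0

-- hand-written bisect_right loop from Source B; a[mid] is always in range when the loop
-- runs (lo < hi ≤ len a), so getD is exact there
def pvBisect (a : List Int) (x : Int) (lo hi : Nat) : Nat :=
  if _h : lo < hi then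
    let mid := (lo + hi) / 2
    if x < a.getD mid 0 then pvBisect a x lo mid
    else pvBisect a x (mid + 1) hi
  else lo
termination_by hi - lo
decreasing_by all_goals omega

def numSmallerByFrequency_alt (queries : List String) (words : List String) : List Int :=
  let wf := PySem.List.sorted (words.map pvB_f) (fun x => x) false
  let n := (wf.length : Int)
  queries.map (fun q => n - (pvBisect wf (pvB_f q) 0 wf.length : Int))

-- ===== PRECONDITION & SPEC =====
-- Pre_ excludes exactly the inputs with an empty string among words or queries, on which
-- A raises (IndexError on word[0] after sorting).
def Pre_numSmallerByFrequency (queries : List String) (words : List String) : Prop :=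
  (∀ w ∈ words, w.toList ≠ []) ∧ (∀ q ∈ queries, q.toList ≠ [])
instance (queries : List String) (words : List String) : Decidable (Pre_numSmallerByFrequency queries words) := by unfold Pre_numSmallerByFrequency; infer_instance

def pvWitness_numSmallerByFrequency : List String × List String := (["aa", "bbb"], ["bcb", "cc", "a"])

def Spec_numSmallerByFrequency (queries : List String) (words : List String) (out : List Int) : Prop := out = numSmallerByFrequency_alt queries words
instance (queries : List String) (words : List String) (out : List Int) : Decidable (Spec_numSmallerByFrequency queries words out) := by unfold Spec_numSmallerByFrequency; infer_instance

-- ===== CLAIM (what is proved, stated in full; the proofs are below) =====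
def Claim_equal_numSmallerByFrequency : Prop := ∀ (queries : List String) (words : List String), Dom_numSmallerByFrequency queries words → Pre_numSmallerByFrequency queries words → Spec_numSmallerByFrequency queries words (numSmallerByFrequency queries words)

-- ===== LEMMAS AND PROOFS =====

-- the two frequency helpers agree on nonempty strings
lemma pv_f_eq (s : String) (hs : s.toList ≠ []) : pvA_f s = pvB_f s := by
  simp only [pvA_f, pvB_f]
  have hwne : PySem.List.sorted s.toList (fun c => c) false ≠ [] := by
    simpa [PySem.List.sorted_eq_nil_iff] using hs
  obtain ⟨c, t, hct⟩ := List.exists_cons_of_ne_nil hwne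
  obtain ⟨m, hm⟩ : ∃ m, PySem.List.min? s.toList (fun c => c) = some m := by
    cases h : PySem.List.min? s.toList (fun c => c) with
    | none => exact absurd ((PySem.List.min?_eq_none_iff _ _).1 h) hs
    | some m => exact ⟨m, rfl⟩
  have hperm : (PySem.List.sorted s.toList (fun c => c) false).Perm s.toList :=
    PySem.List.sorted_perm _ _ _
  have hcm : c ∈ s.toList := hperm.mem_iff.1 (hct ▸ List.mem_cons_self)
  have h1 : c ≤ m := PySem.List.key_head_sorted_le s.toList (fun c => c) hct m (PySem.List.min?_mem hm)
  have h2 : m ≤ c := PySem.List.min?_id_le hm c hcm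
  have hmc : m = c := le_antisymm h2 h1
  have h0 : PySem.List.pyGet? (c :: t) (0 : Int) = some c := by
    simp [PySem.List.pyGet?, PySem.List.pyIdx?]
  have hcount : (c :: t).count c = s.toList.countP (fun x => x == c) := by
    rw [← hct, hperm.count_eq, List.count]
  simp only [hct, hm, hmc, h0, hcount]

-- pvBisect returns an index r with lo ≤ r ≤ hi splitting a sorted list at x
lemma pvBisect_spec (a : List Int) (x : Int) (ha : a.Pairwise (· ≤ ·)) :
    ∀ (k lo hi : Nat), hi - lo = k → lo ≤ hi → hi ≤ a.length →
    (∀ j, j < lo → ∀ hj : j < a.length, a[j] ≤ x) →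
    (∀ j, hi ≤ j → ∀ hj : j < a.length, x < a[j]) →
    pvBisect a x lo hi ≤ a.length ∧
    (∀ j, j < pvBisect a x lo hi → ∀ hj : j < a.length, a[j] ≤ x) ∧
    (∀ j, pvBisect a x lo hi ≤ j → ∀ hj : j < a.length, x < a[j]) := by
  have hmono : ∀ (i j : Nat) (hi : i < a.length) (hj : j < a.length), i ≤ j → a[i] ≤ a[j] := by
    intro i j hi hj hij
    rcases Nat.lt_or_ge i j with h | h
    · exact List.pairwise_iff_getElem.1 ha i j hi hj h
    · have : i = j := le_antisymm hij h
      subst this; exact le_refl _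
  intro k
  induction k using Nat.strong_induction_on with
  | _ k ih =>
    intro lo hi hk hlohi hlen hlo hhi
    rw [pvBisect]
    split
    next hlt =>
      have hmidlt : (lo + hi) / 2 < hi := by omega
      have hmidge : lo ≤ (lo + hi) / 2 := by omega
      have hmidlen : (lo + hi) / 2 < a.length := lt_of_lt_of_le hmidlt hlen
      have hget : a.getD ((lo + hi) / 2) 0 = a[(lo + hi) / 2] := List.getD_eq_getElem a 0 hmidlen
      simp only [hget]
      split
      next hx =>
        exact ih (( lo + hi) / 2 - lo) (by omega) lo ((lo + hi) / 2) rfl hmidge (le_of_lt hmidlen) hlo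
          (fun j hj hjl => lt_of_lt_of_le hx (hmono _ _ hmidlen hjl hj))
      next hx =>
        rw [not_lt] at hx
        exact ih (hi - ((lo + hi) / 2 + 1)) (by omega) ((lo + hi) / 2 + 1) hi rfl (by omega) hlen
          (fun j hj hjl => le_trans (hmono _ _ hjl hmidlen (by omega)) hx) hhi
    next hlt =>
      have : lo = hi := by omega
      subst this
      exact ⟨le_trans hlohi hlen, hlo, hhi⟩

-- on a sorted list, length - bisect_right x = number of elements > x
lemma pv_count_gt (a : List Int) (x : Int) (ha : a.Pairwise (· ≤ ·)) :
    (a.length : Int) - (pvBisect a x 0 a.length : Int)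
      = (a.countP (fun n => decide (x < n)) : Int) := by
  obtain ⟨hr1, hr2, hr3⟩ := pvBisect_spec a x ha a.length 0 a.length rfl (Nat.zero_le _) le_rfl
    (fun j hj _ => absurd hj (Nat.not_lt_zero j)) (fun j hj hjl => absurd hjl (by omega))
  set r := pvBisect a x 0 a.length with hrdef
  have hsplit : a = a.take r ++ a.drop r := (List.take_append_drop r a).symm
  have h1 : (a.take r).countP (fun n => decide (x < n)) = 0 := by
    rw [List.countP_eq_zero]
    intro b hb
    obtain ⟨i, hi, hib⟩ := List.mem_iff_getElem.1 hb
    have hil : i < a.length := by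
      have := hi; simp [List.length_take] at this; omega
    have : b = a[i] := by rw [← hib, List.getElem_take]
    subst this
    have hir : i < r := by have := hi; simp [List.length_take] at this; omega
    simpa using not_lt.2 (hr2 i hir hil)
  have h2 : (a.drop r).countP (fun n => decide (x < n)) = (a.drop r).length := by
    rw [List.countP_eq_length]
    intro b hb
    obtain ⟨i, hi, hib⟩ := List.mem_iff_getElem.1 hb
    have hil : r + i < a.length := by have := hi; simp [List.length_drop] at this; omega
    have : b = a[r + i] := by rw [← hib, List.getElem_drop]
    subst this
    simpa using hr3 (r + i) (by omega) hil
  conv_rhs => rw [hsplit]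
  rw [List.countP_append, h1, h2, List.length_drop]
  omega

-- ===== VERDICT (by name: the statement is the Claim_ definition above) =====
theorem numSmallerByFrequency_spec : Claim_equal_numSmallerByFrequency := by
  intro queries words _hdom hpre
  show numSmallerByFrequency queries words = numSmallerByFrequency_alt queries words
  unfold numSmallerByFrequency numSmallerByFrequency_alt
  rw [PySem.List.foldl_append_singleton_eq_map pvA_f words []]
  have hmap : words.map pvA_f = words.map pvB_f :=
    List.map_congr_left fun w hw => pv_f_eq w (hpre.1 w hw)
  rw [List.nil_append, hmap,
    PySem.List.foldl_append_singleton_eq_map _ queries [], List.nil_append]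
  apply List.map_congr_left
  intro q hq
  have hF : pvA_f q = pvB_f q := pv_f_eq q (hpre.2 q hq)
  rw [hF]
  set wf := PySem.List.sorted (words.map pvB_f) (fun x => x) false with hwf
  have hpw : wf.Pairwise (· ≤ ·) := PySem.List.sorted_pairwise (words.map pvB_f) (fun x => x)
  have hcond : (fun (count : Int) n => if n > pvB_f q then count + 1 else count)
      = fun (count : Int) n => if (fun n => decide (pvB_f q < n)) n = true then count + 1 else count := by
    funext c n; simp [gt_iff_lt]
  rw [hcond, PySem.List.foldl_count_if, ← pv_count_gt wf (pvB_f q) hpw]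
  ring
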